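-- pv_equiv track=rewrite | github.com/Recon-Fuzz/scfuzzbench | analysis/analyze.py | compute_exclusive_events
-- ===== SOURCE A (Python) =====
-- from collections import defaultdict
-- from typing import Dict, Iterable, List, Optional, Tuple
--
-- def compute_exclusive_events(event_sets: Dict[str, set]) -> Tuple[Dict[str, set], Dict[str, set]]:
--     event_to_fuzzers: Dict[str, set] = defaultdict(set)
--     for fuzzer, events in event_sets.items():
--         for event in events:
--             event_to_fuzzers[event].add(fuzzer)
--     exclusive: Dict[str, set] = {fuzzer: set() for fuzzer in event_sets}
--     for event, fuzzers in event_to_fuzzers.items():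
--         if len(fuzzers) == 1:
--             fuzzer = next(iter(fuzzers))
--             exclusive[fuzzer].add(event)
--     return exclusive, event_to_fuzzers
-- ===== SOURCE B (Python) =====
-- from collections import defaultdict
--
-- def compute_exclusive_events(event_sets):
--     exclusive = {fuzzer: set() for fuzzer in event_sets}
--     event_to_fuzzers = defaultdict(set)
--     for fuzzer, events in event_sets.items():
--         for event in events:
--             owners = event_to_fuzzers[event]
--             if not owners:
--                 exclusive[fuzzer].add(event)
--             elif len(owners) == 1:
--                 exclusive[next(iter(owners))].discard(event)
--             owners.add(fuzzer)
--     return exclusive, event_to_fuzzers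
-- ===== Notes on version B (the rewrite author's own statement) =====
-- stated objective: alternative
-- what changed: B fuses A's two passes into one: instead of building the full inverted index and then re-scanning it for singleton owner sets, B maintains the exclusivity map incrementally while building the index (first owner claims the event, second owner revokes the claim).
import Mathlib
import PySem

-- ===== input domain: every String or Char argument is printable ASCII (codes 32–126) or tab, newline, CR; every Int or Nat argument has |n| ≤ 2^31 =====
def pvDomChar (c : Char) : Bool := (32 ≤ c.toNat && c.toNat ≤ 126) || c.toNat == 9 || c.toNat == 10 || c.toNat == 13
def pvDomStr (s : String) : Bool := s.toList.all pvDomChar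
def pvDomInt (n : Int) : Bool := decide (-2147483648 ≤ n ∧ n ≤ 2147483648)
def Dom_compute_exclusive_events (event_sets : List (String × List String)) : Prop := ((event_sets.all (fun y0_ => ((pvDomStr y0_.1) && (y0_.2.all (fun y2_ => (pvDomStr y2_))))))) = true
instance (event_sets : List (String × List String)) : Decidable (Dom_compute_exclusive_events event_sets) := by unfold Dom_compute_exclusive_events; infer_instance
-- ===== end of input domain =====

-- B fuses A's two passes into one: it maintains the exclusivity map incrementally while
-- building the inverted index, instead of building the full index first and re-scanning it.
-- Objective: alternative single-pass decomposition (same asymptotic cost).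

-- ===== PORT A =====
-- Literal transliteration of A. Python dict[str, set] is PySem.Dict String (PySem.Set String);
-- `exclusive[fuzzer].add(event)` is ported as Dict.modify (the key is provably always present,
-- so Python's KeyError path is unreachable under Pre_).
def compute_exclusive_events (event_sets : List (String × List String)) :
    (List (String × List String)) × (List (String × List String)) :=
  let event_to_fuzzers : PySem.Dict String (PySem.Set String) :=
    event_sets.foldl (fun d p =>
      p.2.foldl (fun d event => d.modify event [] (fun s => PySem.Set.add s p.1)) d)
      PySem.Dict.empty
  let exclusive0 : PySem.Dict String (PySem.Set String) :=
    event_sets.foldl (fun d p => d.insert p.1 []) PySem.Dict.empty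
  let exclusive :=
    event_to_fuzzers.items.foldl (fun ex q =>
      if PySem.Set.len q.2 == 1 then
        ex.modify (q.2.headD "") [] (fun s => PySem.Set.add s q.1)
      else ex) exclusive0
  (exclusive.items, event_to_fuzzers.items)

-- ===== PORT B =====
-- Literal transliteration of Source B: one fused pass; `owners = event_to_fuzzers[event]` is read
-- with getD and written back with insert (defaultdict semantics).
def compute_exclusive_events_alt (event_sets : List (String × List String)) :
    (List (String × List String)) × (List (String × List String)) :=
  let exclusive0 : PySem.Dict String (PySem.Set String) :=
    event_sets.foldl (fun d p => d.insert p.1 []) PySem.Dict.empty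
  let st :=
    event_sets.foldl (fun st p =>
      p.2.foldl
        (fun (st : PySem.Dict String (PySem.Set String) × PySem.Dict String (PySem.Set String)) event =>
          let owners := st.2.getD event []
          let exclusive :=
            if owners.isEmpty then st.1.modify p.1 [] (fun s => PySem.Set.add s event)
            else if PySem.Set.len owners == 1 then
              st.1.modify (owners.headD "") [] (fun s => PySem.Set.discard s event)
            else st.1
          (exclusive, st.2.insert event (PySem.Set.add owners p.1)))
        st)
      (exclusive0, PySem.Dict.empty)
  (st.1.items, st.2.items)

-- ===== PRECONDITION & SPEC =====
-- Pre_ only requires the association list to be a faithful encoding of A's Python input type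
-- dict[str, set]: distinct fuzzer keys and distinct events per fuzzer. Every actual Python
-- input satisfies this; no input A returns on is excluded.
def Pre_compute_exclusive_events (event_sets : List (String × List String)) : Prop :=
  (event_sets.map (·.1)).Nodup ∧ ∀ p ∈ event_sets, p.2.Nodup
instance (event_sets : List (String × List String)) : Decidable (Pre_compute_exclusive_events event_sets) := by
  unfold Pre_compute_exclusive_events; infer_instance

def pvWitness_compute_exclusive_events : (List (String × List String)) :=
  [("af", ["x", "y"]), ("bf", ["y", "z"])]

def Spec_compute_exclusive_events (event_sets : List (String × List String)) (out : (List (String × List String)) × (List (String × List String))) : Prop := out = compute_exclusive_events_alt event_sets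
instance (event_sets : List (String × List String)) (out : (List (String × List String)) × (List (String × List String))) : Decidable (Spec_compute_exclusive_events event_sets out) := by unfold Spec_compute_exclusive_events; infer_instance

-- ===== CLAIM (what is proved, stated in full; the proofs are below) =====
def Claim_equal_compute_exclusive_events : Prop := ∀ (event_sets : List (String × List String)), Dom_compute_exclusive_events event_sets → Pre_compute_exclusive_events event_sets → Spec_compute_exclusive_events event_sets (compute_exclusive_events event_sets)

-- ===== LEMMAS AND PROOFS =====

-- Abbreviations for the proof.
abbrev PVD := PySem.Dict String (PySem.Set String)

/-- The input flattened to (fuzzer, event) pairs in processing order. -/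
def pvFlat (es : List (String × List String)) : List (String × String) :=
  es.flatMap (fun p => p.2.map (fun e => (p.1, e)))

/-- Fuzzers that reported `ev`, in order. -/
def pvOwners (l : List (String × String)) (ev : String) : List String :=
  (l.filter (fun q => q.2 == ev)).map (·.1)

/-- The inverted index as a fold over the flattened pairs. -/
def pvE2F (l : List (String × String)) : PVD :=
  l.foldl (fun d q => d.modify q.2 [] (fun s => PySem.Set.add s q.1)) PySem.Dict.empty

/-- The seed dict `{fuzzer: set() for fuzzer in event_sets}`. -/
def pvSeed (es : List (String × List String)) : PVD :=
  es.foldl (fun d p => d.insert p.1 []) PySem.Dict.empty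

/-- The common normal form of both exclusivity maps: events (first occurrence order)
whose owner list is exactly `[φ]`. -/
def pvSpec (l : List (String × String)) (φ : String) : List String :=
  (PySem.Set.ofList (l.map (·.2))).filter (fun ev => decide (pvOwners l ev = [φ]))

/-- A's second pass, one step. -/
def pvAStep (ex : PVD) (q : String × PySem.Set String) : PVD :=
  if PySem.Set.len q.2 == 1 then ex.modify (q.2.headD "") [] (fun s => PySem.Set.add s q.1)
  else ex

/-- B's fused step on the flattened pairs. -/
def pvBStep (st : PVD × PVD) (q : String × String) : PVD × PVD :=
  let owners := st.2.getD q.2 []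
  let exclusive :=
    if owners.isEmpty then st.1.modify q.1 [] (fun s => PySem.Set.add s q.2)
    else if PySem.Set.len owners == 1 then
      st.1.modify (owners.headD "") [] (fun s => PySem.Set.discard s q.2)
    else st.1
  (exclusive, st.2.insert q.2 (PySem.Set.add owners q.1))

theorem pv_foldl_flat {α : Type} (es : List (String × List String))
    (step : α → String × String → α) (init : α) :
    (pvFlat es).foldl step init
      = es.foldl (fun a p => p.2.foldl (fun a e => step a (p.1, e)) a) init := by
  induction es generalizing init with
  | nil => rfl
  | cons p rest ih =>
      simp only [pvFlat, List.flatMap_cons, List.foldl_append, List.foldl_map, List.foldl_cons]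
      exact ih _

theorem pvOwners_append (l l' : List (String × String)) (ev : String) :
    pvOwners (l ++ l') ev = pvOwners l ev ++ pvOwners l' ev := by
  simp [pvOwners, List.filter_append]

theorem pvOwners_singleton (q : String × String) (ev : String) :
    pvOwners [q] ev = if q.2 = ev then [q.1] else [] := by
  simp only [pvOwners, List.filter_cons, List.filter_nil]
  by_cases h : q.2 = ev <;> simp [h]

theorem pvOwners_eq_nil_iff (l : List (String × String)) (ev : String) :
    pvOwners l ev = [] ↔ ∀ q ∈ l, q.2 ≠ ev := by
  simp [pvOwners, List.filter_eq_nil_iff]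

theorem pvOwners_mem_fst {l : List (String × String)} {ev g : String}
    (h : g ∈ pvOwners l ev) : g ∈ l.map (·.1) := by
  simp only [pvOwners, List.mem_map] at h
  obtain ⟨q, hq, rfl⟩ := h
  exact List.mem_map.mpr ⟨q, (List.mem_filter.mp hq).1, rfl⟩

theorem pvE2F_append_singleton (l : List (String × String)) (q : String × String) :
    pvE2F (l ++ [q]) = (pvE2F l).modify q.2 [] (fun s => PySem.Set.add s q.1) := by
  simp [pvE2F, List.foldl_append]

theorem pvE2F_keys (l : List (String × String)) :
    (pvE2F l).keys = PySem.Set.ofList (l.map (·.2)) := by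
  have h := PySem.Dict.keys_foldl_modify_key (κ := String) (ν := PySem.Set String)
    l (fun q => q.2) [] (fun _ q => fun s => PySem.Set.add s q.1) PySem.Dict.empty
  simpa [pvE2F, PySem.Dict.keys_empty, PySem.Set.update_nil_left] using h

theorem pvE2F_getD (l : List (String × String)) (h : ∀ ev, (pvOwners l ev).Nodup) :
    ∀ ev, (pvE2F l).getD ev [] = pvOwners l ev := by
  induction l using List.reverseRecOn with
  | nil => intro ev; simp [pvE2F, pvOwners, PySem.Dict.getD_empty]
  | append_singleton l q ih =>
      have hl : ∀ ev, (pvOwners l ev).Nodup := by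
        intro ev
        have hle := h ev
        rw [pvOwners_append] at hle
        exact hle.of_append_left
      intro ev
      rw [pvE2F_append_singleton, PySem.Dict.getD_modify, pvOwners_append, pvOwners_singleton]
      by_cases hev : ev = q.2
      · subst hev
        have hnm : q.1 ∉ pvOwners l q.2 := by
          have hq := h q.2
          rw [pvOwners_append, pvOwners_singleton, if_pos rfl] at hq
          intro hmem
          exact (List.disjoint_of_nodup_append hq) hmem (List.mem_singleton.mpr rfl)
        rw [if_pos rfl, if_pos rfl, ih hl, PySem.Set.add_of_not_mem hnm]
      · rw [if_neg hev, ih hl, if_neg (fun hh => hev hh.symm), List.append_nil]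

theorem pvSeed_keys (es : List (String × List String)) :
    (pvSeed es).keys = PySem.Set.ofList (es.map (·.1)) := by
  have h := PySem.Dict.keys_foldl_insert_key (κ := String) (ν := PySem.Set String)
    es (fun p => p.1) (fun _ _ => []) PySem.Dict.empty
  simpa [pvSeed, PySem.Dict.keys_empty, PySem.Set.update_nil_left] using h

theorem pvSeed_getD (es : List (String × List String)) (φ : String) :
    (pvSeed es).getD φ [] = [] := by
  induction es using List.reverseRecOn with
  | nil => simp [pvSeed, PySem.Dict.getD_empty]
  | append_singleton es p ih =>
      rw [pvSeed, List.foldl_append]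
      simp only [List.foldl_cons, List.foldl_nil]
      rw [PySem.Dict.getD_insert]
      split <;> [rfl; exact ih]

theorem pvOwners_flat (es : List (String × List String)) (h2 : ∀ p ∈ es, p.2.Nodup)
    (ev : String) :
    pvOwners (pvFlat es) ev = (es.filter (fun p => p.2.contains ev)).map (·.1) := by
  induction es with
  | nil => rfl
  | cons p rest ih =>
      have hp : p.2.Nodup := h2 p (List.mem_cons_self)
      have hblock : pvOwners (p.2.map (fun e => (p.1, e))) ev
          = if p.2.contains ev then [p.1] else [] := by
        simp only [pvOwners, List.filter_map]
        have hcomp : ((fun q : String × String => q.2 == ev) ∘ fun e => (p.1, e))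
            = (fun e => e == ev) := rfl
        rw [hcomp, List.filter_beq]
        by_cases hm : ev ∈ p.2
        · simp [List.count_eq_one_of_mem hp hm, hm]
        · simp [List.count_eq_zero_of_not_mem hm, hm]
      rw [pvFlat, List.flatMap_cons, ← pvFlat, pvOwners_append,
        ih (fun q hq => h2 q (List.mem_cons_of_mem _ hq)), hblock]
      by_cases hm : ev ∈ p.2 <;> simp [hm]

theorem pvOwners_flat_nodup (es : List (String × List String))
    (h1 : (es.map (·.1)).Nodup) (h2 : ∀ p ∈ es, p.2.Nodup) :
    ∀ ev, (pvOwners (pvFlat es) ev).Nodup := by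
  intro ev
  rw [pvOwners_flat es h2 ev]
  exact h1.sublist (List.Sublist.map _ (List.filter_sublist (l := es)))

theorem pvFlat_fst_mem {es : List (String × List String)} {q : String × String}
    (h : q ∈ pvFlat es) : q.1 ∈ es.map (·.1) := by
  simp only [pvFlat, List.mem_flatMap, List.mem_map] at h
  obtain ⟨p, hp, e, _, rfl⟩ := h
  exact List.mem_map.mpr ⟨p, hp, rfl⟩

/-- Characterisation of A's second pass over `E.map (fun ev => (ev, w ev))`. -/
theorem pvAPass_char (E : List String) (w : String → List String) (ex : PVD)
    (hE : E.Nodup) (hx : ∀ φ, ex.getD φ [] = [])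
    (hw : ∀ ev ∈ E, ∀ g ∈ w ev, g ∈ ex.keys) :
    ((E.map (fun ev => (ev, w ev))).foldl pvAStep ex).keys = ex.keys ∧
    ∀ φ, ((E.map (fun ev => (ev, w ev))).foldl pvAStep ex).getD φ []
        = E.filter (fun ev => decide (w ev = [φ])) := by
  induction E using List.reverseRecOn with
  | nil => simpa using hx
  | append_singleton E ev ih =>
      have hE' : E.Nodup := hE.of_append_left
      have hw' : ∀ e ∈ E, ∀ g ∈ w e, g ∈ ex.keys :=
        fun e he => hw e (List.mem_append_left _ he)
      obtain ⟨ihk, ihg⟩ := ih hE' hw'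
      rw [List.map_append, List.foldl_append]
      simp only [List.map_cons, List.map_nil, List.foldl_cons, List.foldl_nil]
      have hnm : ev ∉ E := by
        intro hmem
        exact (List.disjoint_of_nodup_append hE) hmem (List.mem_singleton.mpr rfl)
      by_cases h1 : (w ev).length = 1
      · obtain ⟨g, hg⟩ := List.length_eq_one_iff.mp h1
        have hgk : g ∈ ex.keys := hw ev (by simp) g (by simp [hg])
        have hstep : ∀ d : PVD, pvAStep d (ev, w ev)
            = d.modify g [] (fun s => PySem.Set.add s ev) := by
          intro d; simp [pvAStep, hg, PySem.Set.len]
        rw [hstep]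
        constructor
        · rw [PySem.Dict.modify,
            PySem.Dict.keys_insert_of_contains _ _
              ((PySem.Dict.contains_iff_mem_keys _ _).mpr (ihk ▸ hgk)), ihk]
        · intro φ
          rw [PySem.Dict.getD_modify, List.filter_append]
          by_cases hφ : φ = g
          · subst hφ
            rw [if_pos rfl, ihg]
            have hadd : ev ∉ E.filter (fun e => decide (w e = [φ])) :=
              fun hmem => hnm (List.mem_of_mem_filter hmem)
            rw [PySem.Set.add_of_not_mem hadd]
            simp [hg]
          · rw [if_neg hφ, ihg]
            have hne : ¬ (w ev = [φ]) := by
              rw [hg]; intro hh; injection hh with hh1 _; exact hφ hh1.symm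
            simp [hne]
      · have hstep : ∀ d : PVD, pvAStep d (ev, w ev) = d := by
          intro d; simp [pvAStep, PySem.Set.len, h1]
        rw [hstep]
        refine ⟨ihk, fun φ => ?_⟩
        rw [ihg, List.filter_append, List.filter_cons]
        have hne : ¬ (w ev = [φ]) := fun h => h1 (by rw [h]; rfl)
        simp [hne]

/-- Characterisation of B's fused pass. -/
theorem pvBPass_char (l : List (String × String)) (ex : PVD)
    (hl : ∀ ev, (pvOwners l ev).Nodup) (hx : ∀ φ, ex.getD φ [] = [])
    (hfz : ∀ q ∈ l, q.1 ∈ ex.keys) :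
    (l.foldl pvBStep (ex, PySem.Dict.empty)).2 = pvE2F l ∧
    (l.foldl pvBStep (ex, PySem.Dict.empty)).1.keys = ex.keys ∧
    ∀ φ, (l.foldl pvBStep (ex, PySem.Dict.empty)).1.getD φ [] = pvSpec l φ := by
  induction l using List.reverseRecOn with
  | nil =>
      refine ⟨rfl, rfl, fun φ => ?_⟩
      simp [pvSpec, PySem.Set.ofList, hx]
  | append_singleton l q ih =>
      have hl' : ∀ ev, (pvOwners l ev).Nodup := by
        intro ev
        have hle := hl ev
        rw [pvOwners_append] at hle
        exact hle.of_append_left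
      have hfz' : ∀ q' ∈ l, q'.1 ∈ ex.keys :=
        fun q' hq' => hfz q' (List.mem_append_left _ hq')
      obtain ⟨ih2, ihk, ihg⟩ := ih hl' hfz'
      rw [List.foldl_append, List.foldl_cons, List.foldl_nil]
      set r := l.foldl pvBStep (ex, PySem.Dict.empty) with hr
      have hOwn : r.2.getD q.2 [] = pvOwners l q.2 := by
        rw [ih2]; exact pvE2F_getD l hl' q.2
      have hOwnApp : ∀ ev, pvOwners (l ++ [q]) ev
          = pvOwners l ev ++ (if q.2 = ev then [q.1] else []) := by
        intro ev; rw [pvOwners_append, pvOwners_singleton]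
      -- the inverted-index component is the same in all three branches
      have h2nd : (pvBStep r q).2 = pvE2F (l ++ [q]) := by
        rw [pvE2F_append_singleton, PySem.Dict.modify, ← ih2]
        simp [pvBStep]
      have hkmem : ∀ g', g' ∈ pvOwners l q.2 → g' ∈ ex.keys := by
        intro g' hg'
        obtain ⟨p', hp', he⟩ := List.mem_map.mp (pvOwners_mem_fst hg')
        exact he ▸ hfz' p' hp'
      rcases howners : pvOwners l q.2 with _ | ⟨g, _ | ⟨g2, grest⟩⟩
      · -- first owner: add q.2 to exclusive[q.1]
        have hq2nm : q.2 ∉ l.map (·.2) := by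
          intro hmem
          obtain ⟨q', hq', he⟩ := List.mem_map.mp hmem
          exact ((pvOwners_eq_nil_iff l q.2).mp howners) q' hq' he
        have hstep : (pvBStep r q).1 = r.1.modify q.1 [] (fun s => PySem.Set.add s q.2) := by
          simp [pvBStep, hOwn, howners]
        rw [hstep]
        have hq1k : q.1 ∈ ex.keys := hfz q (List.mem_append_right _ (List.mem_singleton.mpr rfl))
        refine ⟨h2nd, ?_, ?_⟩
        · rw [PySem.Dict.modify,
            PySem.Dict.keys_insert_of_contains _ _
              ((PySem.Dict.contains_iff_mem_keys _ _).mpr (ihk ▸ hq1k)), ihk]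
        · intro φ
          have hbase : PySem.Set.ofList ((l ++ [q]).map (·.2))
              = PySem.Set.ofList (l.map (·.2)) ++ [q.2] := by
            rw [List.map_append, List.map_cons, List.map_nil,
              PySem.Set.ofList_append_singleton,
              PySem.Set.add_of_not_mem (fun h => hq2nm ((PySem.Set.mem_ofList _ _).mp h))]
          have hspec : pvSpec (l ++ [q]) φ
              = pvSpec l φ ++ (if φ = q.1 then [q.2] else []) := by
            rw [pvSpec, hbase, List.filter_append]
            congr 1
            · apply List.filter_congr
              intro ev hev
              have hevne : q.2 ≠ ev := by
                intro hh
                exact hq2nm (hh ▸ (PySem.Set.mem_ofList _ _).mp hev)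
              rw [hOwnApp, if_neg hevne, List.append_nil]
            · rw [List.filter_cons, List.filter_nil, hOwnApp q.2, if_pos rfl, howners,
                List.nil_append]
              by_cases hφ : φ = q.1
              · simp [hφ]
              · have : ¬ ([q.1] = [φ]) := by
                  intro hh; injection hh with h1 _; exact hφ h1.symm
                simp [hφ, this]
          rw [hspec, PySem.Dict.getD_modify]
          by_cases hφ : φ = q.1
          · subst hφ
            rw [if_pos rfl, ihg, if_pos rfl]
            have hnm : q.2 ∉ pvSpec l q.1 := by
              intro hmem
              exact hq2nm ((PySem.Set.mem_ofList _ _).mp (List.mem_of_mem_filter hmem))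
            rw [PySem.Set.add_of_not_mem hnm]
          · rw [if_neg hφ, ihg, if_neg hφ, List.append_nil]
      · -- second owner: q.2 stops being exclusive to g
        have hq2m : q.2 ∈ l.map (·.2) := by
          have : g ∈ pvOwners l q.2 := by rw [howners]; exact List.mem_singleton.mpr rfl
          rw [pvOwners] at this
          obtain ⟨q', hq', _⟩ := List.mem_map.mp this
          have := (List.mem_filter.mp hq').2
          exact List.mem_map.mpr ⟨q', (List.mem_filter.mp hq').1, by
            simpa using (List.mem_filter.mp hq').2⟩
        have hstep : (pvBStep r q).1 = r.1.modify g [] (fun s => PySem.Set.discard s q.2) := by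
          simp [pvBStep, hOwn, howners, PySem.Set.len]
        rw [hstep]
        have hgk : g ∈ ex.keys :=
          hkmem g (by rw [howners]; exact List.mem_singleton.mpr rfl)
        have hbase : PySem.Set.ofList ((l ++ [q]).map (·.2))
            = PySem.Set.ofList (l.map (·.2)) := by
          rw [List.map_append, List.map_cons, List.map_nil,
            PySem.Set.ofList_append_singleton,
            PySem.Set.add_of_mem ((PySem.Set.mem_ofList _ _).mpr hq2m)]
        have hspec : ∀ φ, pvSpec (l ++ [q]) φ = PySem.Set.discard (pvSpec l φ) q.2 := by
          intro φ
          rw [pvSpec, hbase]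
          have hcomb : (PySem.Set.ofList (l.map (·.2))).filter
                (fun ev => decide (pvOwners (l ++ [q]) ev = [φ]))
              = (PySem.Set.ofList (l.map (·.2))).filter
                (fun ev => decide (pvOwners l ev = [φ]) && !(ev == q.2)) := by
            apply List.filter_congr
            intro ev _
            by_cases hev : ev = q.2
            · subst hev
              rw [hOwnApp, if_pos rfl, howners]
              simp
            · rw [hOwnApp, if_neg (fun hh => hev hh.symm), List.append_nil]
              simp [hev]
          rw [hcomb, PySem.Set.discard, pvSpec, List.filter_filter]
          exact List.filter_congr (fun ev _ => Bool.and_comm _ _)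
        refine ⟨h2nd, ?_, ?_⟩
        · rw [PySem.Dict.modify,
            PySem.Dict.keys_insert_of_contains _ _
              ((PySem.Dict.contains_iff_mem_keys _ _).mpr (ihk ▸ hgk)), ihk]
        · intro φ
          rw [hspec φ, PySem.Dict.getD_modify]
          by_cases hφ : φ = g
          · subst hφ; rw [if_pos rfl, ihg]
          · rw [if_neg hφ, ihg]
            rw [PySem.Set.discard]
            refine (List.filter_eq_self.mpr ?_).symm
            intro ev hev
            rw [pvSpec] at hev
            have hOev : pvOwners l ev = [φ] := of_decide_eq_true (List.mem_filter.mp hev).2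
            have hne : ev ≠ q.2 := by
              intro hh
              rw [hh, howners] at hOev
              injection hOev with h1 _
              exact hφ h1.symm
            simp [hne]
      · -- already shared: nothing changes
        have hq2m : q.2 ∈ l.map (·.2) := by
          have hgm : g ∈ pvOwners l q.2 := by rw [howners]; exact List.mem_cons_self
          rw [pvOwners] at hgm
          obtain ⟨q', hq', _⟩ := List.mem_map.mp hgm
          exact List.mem_map.mpr ⟨q', (List.mem_filter.mp hq').1, by
            simpa using (List.mem_filter.mp hq').2⟩
        have hstep : (pvBStep r q).1 = r.1 := by
          simp only [pvBStep, hOwn, howners]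
          have hc1 : (g :: g2 :: grest).isEmpty = false := rfl
          have hc2 : (PySem.Set.len (g :: g2 :: grest) == 1) = false := by
            simp [PySem.Set.len]
            omega
          rw [hc1, hc2]
          simp
        rw [hstep]
        have hbase : PySem.Set.ofList ((l ++ [q]).map (·.2))
            = PySem.Set.ofList (l.map (·.2)) := by
          rw [List.map_append, List.map_cons, List.map_nil,
            PySem.Set.ofList_append_singleton,
            PySem.Set.add_of_mem ((PySem.Set.mem_ofList _ _).mpr hq2m)]
        refine ⟨h2nd, ihk, fun φ => ?_⟩
        rw [ihg, pvSpec, pvSpec, hbase]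
        apply (List.filter_congr ?_).symm
        intro ev _
        by_cases hev : ev = q.2
        · subst hev
          rw [hOwnApp, if_pos rfl, howners]
          simp
        · rw [hOwnApp, if_neg (fun hh => hev hh.symm), List.append_nil]

-- ===== VERDICT (by name: the statement is the Claim_ definition above) =====
theorem compute_exclusive_events_spec : Claim_equal_compute_exclusive_events := by
  intro es _hdom hpre
  obtain ⟨h1, h2⟩ := hpre
  have hON : ∀ ev, (pvOwners (pvFlat es) ev).Nodup := pvOwners_flat_nodup es h1 h2
  have hkeysmem : ∀ g, g ∈ es.map (·.1) → g ∈ (pvSeed es).keys := by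
    intro g hg
    rw [pvSeed_keys]
    exact (PySem.Set.mem_ofList _ _).mpr hg
  have hseedN : (pvSeed es).keys.Nodup := by
    rw [pvSeed_keys]; exact PySem.Set.nodup_ofList _
  have hkeys : (pvE2F (pvFlat es)).keys = PySem.Set.ofList ((pvFlat es).map (·.2)) :=
    pvE2F_keys _
  have hgetD := pvE2F_getD (pvFlat es) hON
  have hkeysN : (pvE2F (pvFlat es)).keys.Nodup := by
    rw [hkeys]; exact PySem.Set.nodup_ofList _
  have hitems : (pvE2F (pvFlat es)).items
      = (PySem.Set.ofList ((pvFlat es).map (·.2))).map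
          (fun ev => (ev, pvOwners (pvFlat es) ev)) := by
    rw [PySem.Dict.items_eq_map_keys _ hkeysN ([] : PySem.Set String), hkeys]
    exact List.map_congr_left (fun ev _ => by rw [hgetD ev])
  obtain ⟨hAk, hAg⟩ :=
    pvAPass_char (PySem.Set.ofList ((pvFlat es).map (·.2))) (pvOwners (pvFlat es))
      (pvSeed es) (PySem.Set.nodup_ofList _) (pvSeed_getD es)
      (by
        intro ev _ g hg
        obtain ⟨q, hq, he⟩ := List.mem_map.mp (pvOwners_mem_fst hg)
        obtain ⟨p, hp, he2⟩ := by
          simpa only [pvFlat, List.mem_flatMap, List.mem_map] using hq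
        exact hkeysmem g (by
          obtain ⟨e, _, rfl⟩ := he2
          exact he ▸ List.mem_map.mpr ⟨p, hp, rfl⟩))
  obtain ⟨hB2, hBk, hBg⟩ :=
    pvBPass_char (pvFlat es) (pvSeed es) hON (pvSeed_getD es)
      (fun q hq => hkeysmem q.1 (pvFlat_fst_mem hq))
  have hA : compute_exclusive_events es
      = (((pvE2F (pvFlat es)).items.foldl pvAStep (pvSeed es)).items,
          (pvE2F (pvFlat es)).items) :=
    congrArg (fun d : PVD => ((d.items.foldl pvAStep (pvSeed es)).items, d.items))
      (pv_foldl_flat es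
        (fun d q => d.modify q.2 [] (fun s => PySem.Set.add s q.1))
        (PySem.Dict.empty : PVD)).symm
  have hB : compute_exclusive_events_alt es
      = (((pvFlat es).foldl pvBStep (pvSeed es, PySem.Dict.empty)).1.items,
          ((pvFlat es).foldl pvBStep (pvSeed es, PySem.Dict.empty)).2.items) :=
    congrArg (fun st : PVD × PVD => (st.1.items, st.2.items))
      (pv_foldl_flat es pvBStep ((pvSeed es, PySem.Dict.empty) : PVD × PVD)).symm
  show compute_exclusive_events es = compute_exclusive_events_alt es
  rw [hA, hB, Prod.mk.injEq]
  constructor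
  · -- the exclusivity maps agree
    rw [hitems]
    rw [PySem.Dict.items_eq_map_keys _ (by rw [hAk]; exact hseedN) ([] : PySem.Set String),
      PySem.Dict.items_eq_map_keys _ (by rw [hBk]; exact hseedN) ([] : PySem.Set String),
      hAk, hBk]
    exact List.map_congr_left (fun φ _ => by rw [hAg φ, hBg φ]; rfl)
  · rw [hB2, hitems]
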